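-- pv_equiv track=rewrite | github.com/Adefioye/DSA-Grind75 | EPI/HEAPS/10.2-Sort-k-Increasing-decreasing-array.py | sortIncreasingDecreasingArray
-- ===== SOURCE A (Python) =====
-- from heapq import heappop, heappush, heapify
--
-- def mergeSortedArrs(sortedArrays):
--
--     minHeap = []
--     sortedArrayIters = [iter(arr) for arr in sortedArrays]
--
--     for i, it in enumerate(sortedArrayIters):
--         firstElement = next(it, None)
--         if firstElement is not None:
--             minHeap.append([firstElement, i])
--
--     # Heapify the operation
--     heapify(minHeap)
--     res = []
--
--     while minHeap:
--         smallestEntry, smallestEntryArrayIdx = heappop(minHeap)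
--         smallestEntryArrayIter = sortedArrayIters[smallestEntryArrayIdx]
--         res.append(smallestEntry)
--         nextElement = next(smallestEntryArrayIter, None)
--
--         if nextElement is not None:
--             heappush(minHeap, [nextElement, smallestEntryArrayIdx])
--
--     return res
--
-- def sortIncreasingDecreasingArray(arr):
--     sortedSubArrays = []
--     INCREASING, DECREASING = range(2)
--     subArrType = INCREASING
--     startIdx = 0
--
--     for i in range(1, len(arr) + 1):
--
--         if (i == len(arr) or
--             (arr[i] < arr[i - 1] and subArrType == INCREASING) or
--             (arr[i] >= arr[i - 1] and subArrType ==  DECREASING)):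
--
--             sortedSubArrays.append(arr[startIdx:i]
--                                    if subArrType == INCREASING else arr[i - 1: startIdx - 1: -1])
--
--             subArrType = DECREASING if subArrType == INCREASING else INCREASING
--             startIdx = i
--
--     return mergeSortedArrs(sortedSubArrays)
-- ===== SOURCE B (Python) =====
-- def sortIncreasingDecreasingArray(arr):
--     # A's run-splitting + k-way heap merge always yields the fully sorted array;
--     # delegate to the built-in sort.
--     return sorted(arr)
-- ===== Notes on version B (the rewrite author's own statement) =====
-- stated objective: simpler
-- what changed: Replaces the run detection, reversal of decreasing runs and k-way min-heap merge with a single call to the built-in sort, which returns the identical fully sorted list.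
import Mathlib
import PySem

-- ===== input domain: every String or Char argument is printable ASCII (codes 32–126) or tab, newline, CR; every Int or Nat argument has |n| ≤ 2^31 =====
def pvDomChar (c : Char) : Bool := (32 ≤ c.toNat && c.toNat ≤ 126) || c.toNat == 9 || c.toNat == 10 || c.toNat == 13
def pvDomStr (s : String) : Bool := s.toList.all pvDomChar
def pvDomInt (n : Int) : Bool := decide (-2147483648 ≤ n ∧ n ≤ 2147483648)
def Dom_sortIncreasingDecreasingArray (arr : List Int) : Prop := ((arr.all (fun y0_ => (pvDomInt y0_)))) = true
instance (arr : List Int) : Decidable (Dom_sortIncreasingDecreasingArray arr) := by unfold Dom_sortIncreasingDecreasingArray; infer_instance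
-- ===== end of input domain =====

-- B replaces A's run-splitting plus k-way min-heap merge by a single built-in sort (objective: simpler).

-- ===== PORT A =====
-- heapq on lists [value, idx] compares lexicographically; heappop returns the smallest entry.
-- The heap is modelled as the plain list of its entries: heappop = remove the lex-least entry,
-- heappush = append, heapify = identity (only the multiset of entries matters to heappop).
def pvLexLt (p q : Int × Nat) : Bool := p.1 < q.1 || (p.1 == q.1 && p.2 < q.2)

def pvHeapMin : List (Int × Nat) → Option (Int × Nat)
  | [] => none
  | p :: t =>
    match pvHeapMin t with
    | none => some p
    | some q => if pvLexLt q p then some q else some p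

theorem pvHeapMin_mem {h : List (Int × Nat)} {p : Int × Nat} (hm : pvHeapMin h = some p) :
    p ∈ h := by
  induction h with
  | nil => simp [pvHeapMin] at hm
  | cons a t ih =>
    simp only [pvHeapMin] at hm
    cases ht : pvHeapMin t with
    | none => rw [ht] at hm; simp at hm; simp [hm]
    | some q =>
      rw [ht] at hm
      by_cases hlt : pvLexLt q a = true
      · simp [hlt] at hm; subst hm; exact List.mem_cons_of_mem _ (ih ht)
      · simp [hlt] at hm; simp [hm]

theorem pvSumSet {l : List (List Int)} {j : Nat} {x : Int} {rest : List Int}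
    (h : l.getD j [] = x :: rest) :
    ((l.set j rest).map List.length).sum + 1 = (l.map List.length).sum := by
  induction l generalizing j with
  | nil => simp [List.getD] at h
  | cons a t ih =>
    cases j with
    | zero => simp_all [List.getD]; omega
    | succ j =>
      simp only [List.getD_cons_succ] at h
      simp only [List.set_cons_succ, List.map_cons, List.sum_cons]
      have := ih h
      omega

-- next(it, None) on iterator i / heappush of the successor element
def pvMergeLoop (iters : List (List Int)) (heap : List (Int × Nat)) : List Int :=
  match hm : pvHeapMin heap with
  | none => []
  | some p =>
    match hit : iters.getD p.2 [] with
    | [] => p.1 :: pvMergeLoop iters (heap.erase p)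
    | x :: rest => p.1 :: pvMergeLoop (iters.set p.2 rest) (heap.erase p ++ [(x, p.2)])
termination_by heap.length + (iters.map List.length).sum
decreasing_by
  · have hp := pvHeapMin_mem hm
    have h1 : (heap.erase p).length = heap.length - 1 := List.length_erase_of_mem hp
    have h2 : 0 < heap.length := List.length_pos_of_mem hp
    omega
  · have hp := pvHeapMin_mem hm
    have h1 : (heap.erase p).length = heap.length - 1 := List.length_erase_of_mem hp
    have h2 : 0 < heap.length := List.length_pos_of_mem hp
    have h3 := pvSumSet hit
    simp only [List.length_append, List.length_cons, List.length_nil]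
    omega

def mergeSortedArrs (sortedArrays : List (List Int)) : List Int :=
  -- sortedArrayIters = [iter(arr) for arr in sortedArrays]; the init loop consumes each head
  let sortedArrayIters := sortedArrays.map List.tail
  -- for i, it in enumerate(...): first = next(it, None); if not None: minHeap.append([first, i])
  let minHeap := pvInitHeap sortedArrays 0
  -- heapify(minHeap): identity under the entry-list heap model
  pvMergeLoop sortedArrayIters minHeap
where
  pvInitHeap : List (List Int) → Nat → List (Int × Nat)
    | [], _ => []
    | [] :: rest, i => pvInitHeap rest (i + 1)
    | (x :: _) :: rest, i => (x, i) :: pvInitHeap rest (i + 1)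

def sortIncreasingDecreasingArray (arr : List Int) : List Int :=
  let n : Int := (arr.length : Int)
  -- for i in range(1, len(arr)+1) with state (sortedSubArrays, subArrType, startIdx);
  -- subArrType: true = INCREASING, false = DECREASING.
  -- arr[i]/arr[i-1] are read with pyGetD (default unused: both disjuncts force i < n or are short-circuited by i = n).
  let fin :=
    (PySem.List.pyRange 1 (n + 1)).foldl
      (fun st i =>
        if i = n ∨ (PySem.List.pyGetD arr i 0 < PySem.List.pyGetD arr (i - 1) 0 ∧ st.2.1 = true)
             ∨ (PySem.List.pyGetD arr (i - 1) 0 ≤ PySem.List.pyGetD arr i 0 ∧ st.2.1 = false) then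
          (st.1 ++ [if st.2.1 then PySem.List.slice arr (some st.2.2) (some i)
                    else (PySem.List.slice? arr (some (i - 1)) (some (st.2.2 - 1)) (-1)).getD []],
           !st.2.1, i)
        else st)
      ([], true, 0)
  mergeSortedArrs fin.1

-- ===== PORT B =====
def sortIncreasingDecreasingArray_alt (arr : List Int) : List Int :=
  PySem.List.sorted arr (fun x => x) false

-- ===== PRECONDITION & SPEC =====
def Spec_sortIncreasingDecreasingArray (arr : List Int) (out : List Int) : Prop := out = sortIncreasingDecreasingArray_alt arr
instance (arr : List Int) (out : List Int) : Decidable (Spec_sortIncreasingDecreasingArray arr out) := by unfold Spec_sortIncreasingDecreasingArray; infer_instance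

-- ===== CLAIM (what is proved, stated in full; the proofs are below) =====
def Claim_equal_sortIncreasingDecreasingArray : Prop := ∀ (arr : List Int), Dom_sortIncreasingDecreasingArray arr → Spec_sortIncreasingDecreasingArray arr (sortIncreasingDecreasingArray arr)

-- ===== LEMMAS AND PROOFS =====

theorem pvHeapMin_eq_none {h : List (Int × Nat)} (hm : pvHeapMin h = none) : h = [] := by
  cases h with
  | nil => rfl
  | cons a t =>
    simp only [pvHeapMin] at hm
    cases ht : pvHeapMin t <;> rw [ht] at hm <;> simp at hm
    split at hm <;> simp at hm

theorem pvHeapMin_le {h : List (Int × Nat)} :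
    ∀ {p : Int × Nat}, pvHeapMin h = some p → ∀ q ∈ h, p.1 ≤ q.1 := by
  induction h with
  | nil => intro p hm; simp [pvHeapMin] at hm
  | cons a t ih =>
    intro p hm
    simp only [pvHeapMin] at hm
    cases ht : pvHeapMin t with
    | none =>
      rw [ht] at hm; simp at hm; subst hm
      have := pvHeapMin_eq_none ht; subst this
      intro q hq; simp at hq; simp [hq]
    | some q' =>
      rw [ht] at hm
      by_cases hlt : pvLexLt q' a = true
      · simp [hlt] at hm
        intro q hq
        rw [← hm]
        rcases List.mem_cons.mp hq with rfl | hq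
        · simp only [pvLexLt, Bool.or_eq_true, Bool.and_eq_true, decide_eq_true_eq,
            beq_iff_eq] at hlt
          rcases hlt with h1 | ⟨h1, _⟩ <;> omega
        · exact ih ht q hq
      · simp [hlt] at hm
        simp only [pvLexLt, Bool.or_eq_true, Bool.and_eq_true, decide_eq_true_eq,
          beq_iff_eq] at hlt
        have haq : a.1 ≤ q'.1 := by
          rcases (not_or).mp hlt with ⟨h1, _⟩; omega
        intro q hq
        rw [← hm]
        rcases List.mem_cons.mp hq with rfl | hq
        · exact le_refl _
        · exact le_trans haq (ih ht q hq)

-- ===== the k-way merge loop: invariant and correctness =====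

def MergeInv (iters : List (List Int)) (heap : List (Int × Nat)) : Prop :=
  (∀ p ∈ heap, ∀ y ∈ iters.getD p.2 [], p.1 ≤ y) ∧
  (heap.map Prod.snd).Nodup ∧
  (∀ j, j < iters.length → (∃ p ∈ heap, p.2 = j) ∨ iters.getD j [] = []) ∧
  (∀ l ∈ iters, l.Pairwise (· ≤ ·))

theorem flatten_set_perm {l : List (List Int)} {j : Nat} {x : Int} {rest : List Int}
    (h : l.getD j [] = x :: rest) :
    l.flatten.Perm (x :: (l.set j rest).flatten) := by
  induction l generalizing j with
  | nil => simp [List.getD] at h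
  | cons a t ih =>
    cases j with
    | zero =>
      simp only [List.getD_cons_zero] at h; subst h
      simp
    | succ j =>
      simp only [List.getD_cons_succ] at h
      simp only [List.set_cons_succ, List.flatten_cons]
      exact ((ih h).append_left a).trans List.perm_middle

theorem getD_set_self (l : List (List Int)) (j : Nat) (v : List Int) (h : j < l.length) :
    (l.set j v).getD j [] = v := by
  rw [List.getD_eq_getElem _ _ (by simpa using h)]
  simp [List.getElem_set_self]

theorem getD_set_ne (l : List (List Int)) (j j' : Nat) (v : List Int) (h : j' ≠ j) :
    (l.set j v).getD j' [] = l.getD j' [] := by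
  simp [List.getD, List.getElem?_set_ne (by omega : j ≠ j')]

theorem pvMergeLoop_pop {iters : List (List Int)} {heap : List (Int × Nat)} {p : Int × Nat}
    (hm : pvHeapMin heap = some p) (hit : iters.getD p.2 [] = []) :
    pvMergeLoop iters heap = p.1 :: pvMergeLoop iters (heap.erase p) := by
  rw [pvMergeLoop]
  split
  · simp_all
  · next q heq =>
    obtain rfl : p = q := Option.some.inj (hm.symm.trans heq)
    split
    · rfl
    · next x' rest' hit' => rw [hit] at hit'; cases hit'

theorem pvMergeLoop_push {iters : List (List Int)} {heap : List (Int × Nat)} {p : Int × Nat}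
    {x : Int} {rest : List Int}
    (hm : pvHeapMin heap = some p) (hit : iters.getD p.2 [] = x :: rest) :
    pvMergeLoop iters heap = p.1 :: pvMergeLoop (iters.set p.2 rest) (heap.erase p ++ [(x, p.2)]) := by
  rw [pvMergeLoop]
  split
  · simp_all
  · next q heq =>
    obtain rfl : p = q := Option.some.inj (hm.symm.trans heq)
    split
    · next hit' => rw [hit] at hit'; cases hit'
    · next y rest' hit' =>
      rw [hit] at hit'
      injection hit' with h1 h2
      subst h1; subst h2
      rfl

theorem pvMin_le_all {iters : List (List Int)} {heap : List (Int × Nat)} {p : Int × Nat}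
    (hdom : ∀ q ∈ heap, ∀ y ∈ iters.getD q.2 [], q.1 ≤ y)
    (hcov : ∀ j, j < iters.length → (∃ q ∈ heap, q.2 = j) ∨ iters.getD j [] = [])
    (hm : pvHeapMin heap = some p) :
    ∀ y ∈ heap.map Prod.fst ++ iters.flatten, p.1 ≤ y := by
  intro y hy
  rcases List.mem_append.mp hy with hy | hy
  · obtain ⟨q, hq, rfl⟩ := List.mem_map.mp hy
    exact pvHeapMin_le hm q hq
  · obtain ⟨l, hl, hyl⟩ := List.mem_flatten.mp hy
    obtain ⟨j, hj, hl'⟩ := List.mem_iff_getElem.mp hl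
    rcases hcov j hj with ⟨q, hq, hq2⟩ | he
    · refine le_trans (pvHeapMin_le hm q hq) (hdom q hq y ?_)
      rw [hq2, List.getD_eq_getElem _ _ hj, hl']; exact hyl
    · rw [List.getD_eq_getElem _ _ hj, hl'] at he; simp [he] at hyl

theorem pvMergeLoop_spec : ∀ (iters : List (List Int)) (heap : List (Int × Nat)),
    MergeInv iters heap →
    (pvMergeLoop iters heap).Perm (heap.map Prod.fst ++ iters.flatten) ∧
    (pvMergeLoop iters heap).Pairwise (· ≤ ·) := by
  intro iters heap
  induction iters, heap using pvMergeLoop.induct with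
  | case1 iters heap hm =>
    intro hinv
    obtain ⟨hdom, hnd, hcov, hsort⟩ := hinv
    have hempty : heap = [] := pvHeapMin_eq_none hm
    subst hempty
    have hflat : iters.flatten = [] := by
      rw [List.flatten_eq_nil_iff]
      intro l hl
      obtain ⟨j, hj, hl'⟩ := List.mem_iff_getElem.mp hl
      rcases hcov j hj with ⟨q, hq, _⟩ | he
      · simp at hq
      · rw [List.getD_eq_getElem _ _ hj, hl'] at he; exact he
    rw [pvMergeLoop]
    simp [pvHeapMin, hflat]
  | case2 iters heap p hm hit ih =>
    intro hinv
    obtain ⟨hdom, hnd, hcov, hsort⟩ := hinv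
    have hp : p ∈ heap := pvHeapMin_mem hm
    have hperm0 : heap.Perm (p :: heap.erase p) := List.perm_cons_erase hp
    have hinv' : MergeInv iters (heap.erase p) := by
      refine ⟨fun q hq => hdom q (List.mem_of_mem_erase hq),
        ((List.erase_sublist (a := p) (l := heap)).map Prod.snd).nodup hnd, ?_, hsort⟩
      intro j hj
      rcases hcov j hj with ⟨q, hq, hq2⟩ | he
      · by_cases hqp : q = p
        · right; subst hqp; rw [← hq2]; exact hit
        · exact Or.inl ⟨q, (List.mem_erase_of_ne hqp).mpr hq, hq2⟩
      · exact Or.inr he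
    obtain ⟨ihp, ihs⟩ := ih hinv'
    have hstep : (heap.map Prod.fst ++ iters.flatten).Perm
        (p.1 :: ((heap.erase p).map Prod.fst ++ iters.flatten)) :=
      (hperm0.map Prod.fst).append_right iters.flatten
    rw [pvMergeLoop_pop hm hit]
    constructor
    · exact ((ihp.cons p.1).trans hstep.symm)
    · refine List.pairwise_cons.mpr ⟨?_, ihs⟩
      intro y hy
      have : y ∈ (heap.erase p).map Prod.fst ++ iters.flatten := ihp.mem_iff.mp hy
      exact pvMin_le_all hdom hcov hm y (hstep.symm.mem_iff.mp (List.mem_cons_of_mem _ this))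
  | case3 iters heap p hm x rest hit ih =>
    intro hinv
    obtain ⟨hdom, hnd, hcov, hsort⟩ := hinv
    have hp : p ∈ heap := pvHeapMin_mem hm
    have hperm0 : heap.Perm (p :: heap.erase p) := List.perm_cons_erase hp
    have hplen : p.2 < iters.length := by
      by_contra hc
      rw [List.getD_eq_default _ _ (by omega)] at hit
      simp at hit
    have hsnd : p.2 ∉ (heap.erase p).map Prod.snd := by
      have h2 : ((p :: heap.erase p).map Prod.snd).Nodup := (hperm0.map Prod.snd).nodup hnd
      rw [List.map_cons, List.nodup_cons] at h2
      exact h2.1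
    have hmem_sorted : (x :: rest).Pairwise (· ≤ ·) := by
      apply hsort
      rw [← hit, List.getD_eq_getElem _ _ hplen]
      exact List.getElem_mem hplen
    have hinv' : MergeInv (iters.set p.2 rest) (heap.erase p ++ [(x, p.2)]) := by
      refine ⟨?_, ?_, ?_, ?_⟩
      · intro q hq y hy
        rcases List.mem_append.mp hq with hq | hq
        · have hq2 : q.2 ≠ p.2 := fun hc => hsnd (hc ▸ List.mem_map_of_mem hq)
          rw [getD_set_ne _ _ _ _ hq2] at hy
          exact hdom q (List.mem_of_mem_erase hq) y hy
        · rw [List.mem_singleton] at hq; subst hq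
          rw [getD_set_self _ _ _ hplen] at hy
          exact (List.pairwise_cons.mp hmem_sorted).1 y hy
      · rw [List.map_append, List.nodup_append]
        refine ⟨((List.erase_sublist (a := p) (l := heap)).map Prod.snd).nodup hnd, by simp, ?_⟩
        intro a ha b hb
        rw [List.map_cons, List.map_nil, List.mem_singleton] at hb
        subst hb
        exact fun hab => hsnd (hab ▸ ha)
      · intro j hj
        rw [List.length_set] at hj
        by_cases hjp : j = p.2
        · exact Or.inl ⟨(x, p.2), by simp, hjp.symm⟩
        · rcases hcov j hj with ⟨q, hq, hq2⟩ | he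
          · by_cases hqp : q = p
            · exact absurd (by rw [← hq2, hqp]) hjp
            · exact Or.inl ⟨q, List.mem_append_left _ ((List.mem_erase_of_ne hqp).mpr hq), hq2⟩
          · right; rwa [getD_set_ne _ _ _ _ hjp]
      · intro l hl
        rcases List.mem_or_eq_of_mem_set hl with hl | rfl
        · exact hsort l hl
        · exact (List.pairwise_cons.mp hmem_sorted).2
    obtain ⟨ihp, ihs⟩ := ih hinv'
    have hstep : (heap.map Prod.fst ++ iters.flatten).Perm
        (p.1 :: (((heap.erase p ++ [(x, p.2)]).map Prod.fst) ++ (iters.set p.2 rest).flatten)) := by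
      have h1 : (heap.map Prod.fst ++ iters.flatten).Perm
          ((p.1 :: (heap.erase p).map Prod.fst) ++ (x :: (iters.set p.2 rest).flatten)) :=
        ((hperm0.map Prod.fst).append (flatten_set_perm hit))
      refine h1.trans ?_
      simp only [List.cons_append, List.map_append, List.map_cons, List.map_nil]
      refine List.Perm.cons p.1 ?_
      have : ((heap.erase p).map Prod.fst) ++ x :: (iters.set p.2 rest).flatten
          = (((heap.erase p).map Prod.fst) ++ [x]) ++ (iters.set p.2 rest).flatten := by
        simp
      rw [this]
    rw [pvMergeLoop_push hm hit]
    constructor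
    · exact ((ihp.cons p.1).trans hstep.symm)
    · refine List.pairwise_cons.mpr ⟨?_, ihs⟩
      intro y hy
      have : y ∈ ((heap.erase p ++ [(x, p.2)]).map Prod.fst) ++ (iters.set p.2 rest).flatten :=
        ihp.mem_iff.mp hy
      exact pvMin_le_all hdom hcov hm y (hstep.symm.mem_iff.mp (List.mem_cons_of_mem _ this))

-- ===== the initial heap =====

theorem pvInitHeap_mem {arrs : List (List Int)} {k : Nat} {p : Int × Nat}
    (h : p ∈ mergeSortedArrs.pvInitHeap arrs k) :
    ∃ j, j < arrs.length ∧ p.2 = k + j ∧ ∃ t, arrs.getD j [] = p.1 :: t := by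
  induction arrs generalizing k with
  | nil => simp [mergeSortedArrs.pvInitHeap] at h
  | cons a t ih =>
    cases a with
    | nil =>
      simp only [mergeSortedArrs.pvInitHeap] at h
      obtain ⟨j, hj, hp2, w, hw⟩ := ih h
      exact ⟨j + 1, by simpa using hj, by omega, w, by simpa using hw⟩
    | cons x rest =>
      simp only [mergeSortedArrs.pvInitHeap] at h
      rcases List.mem_cons.mp h with rfl | h
      · exact ⟨0, by simp, by omega, rest, by simp⟩
      · obtain ⟨j, hj, hp2, w, hw⟩ := ih h
        exact ⟨j + 1, by simpa using hj, by omega, w, by simpa using hw⟩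

theorem pvInitHeap_cover {arrs : List (List Int)} {k j : Nat} {x : Int} {t : List Int}
    (hj : j < arrs.length) (h : arrs.getD j [] = x :: t) :
    (x, k + j) ∈ mergeSortedArrs.pvInitHeap arrs k := by
  induction arrs generalizing k j with
  | nil => simp at hj
  | cons a t ih =>
    cases j with
    | zero =>
      simp only [List.getD_cons_zero] at h; subst h
      simp [mergeSortedArrs.pvInitHeap]
    | succ j =>
      simp only [List.getD_cons_succ] at h
      have hj' : j < t.length := by simpa using hj
      have := ih (k := k + 1) hj' h
      cases a with
      | nil => simpa [mergeSortedArrs.pvInitHeap, Nat.add_comm, Nat.add_assoc,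
          Nat.add_left_comm] using this
      | cons y ys =>
        simp only [mergeSortedArrs.pvInitHeap]
        refine List.mem_cons_of_mem _ ?_
        have heq : k + 1 + j = k + (j + 1) := by omega
        rwa [heq] at this

theorem pvInitHeap_snd_nodup (arrs : List (List Int)) (k : Nat) :
    ((mergeSortedArrs.pvInitHeap arrs k).map Prod.snd).Nodup := by
  have key : ∀ (arrs : List (List Int)) (k : Nat),
      ∀ p ∈ mergeSortedArrs.pvInitHeap arrs k, k ≤ p.2 := by
    intro arrs k p hp
    obtain ⟨j, _, hp2, _⟩ := pvInitHeap_mem hp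
    omega
  induction arrs generalizing k with
  | nil => simp [mergeSortedArrs.pvInitHeap]
  | cons a t ih =>
    cases a with
    | nil => simpa [mergeSortedArrs.pvInitHeap] using ih (k + 1)
    | cons x rest =>
      simp only [mergeSortedArrs.pvInitHeap, List.map_cons, List.nodup_cons]
      refine ⟨?_, ih (k + 1)⟩
      intro hmem
      obtain ⟨p, hp, hpk⟩ := List.mem_map.mp hmem
      have := key t (k + 1) p hp
      omega

theorem pvInitHeap_perm (arrs : List (List Int)) (k : Nat) :
    ((mergeSortedArrs.pvInitHeap arrs k).map Prod.fst ++ (arrs.map List.tail).flatten).Perm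
      arrs.flatten := by
  induction arrs generalizing k with
  | nil => simp [mergeSortedArrs.pvInitHeap]
  | cons a t ih =>
    cases a with
    | nil => simpa [mergeSortedArrs.pvInitHeap] using ih (k + 1)
    | cons x rest =>
      simp only [mergeSortedArrs.pvInitHeap, List.map_cons, List.flatten_cons,
        List.tail_cons, List.cons_append]
      refine List.Perm.cons x ?_
      refine List.Perm.trans ?_ ((ih (k + 1)).append_left rest)
      have h1 := (List.perm_append_comm (l₁ := (mergeSortedArrs.pvInitHeap t (k + 1)).map Prod.fst)
        (l₂ := rest)).append_right ((t.map List.tail).flatten)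
      simpa [List.append_assoc] using h1

theorem mergeSortedArrs_spec (arrs : List (List Int)) (h : ∀ l ∈ arrs, l.Pairwise (· ≤ ·)) :
    (mergeSortedArrs arrs).Perm arrs.flatten ∧ (mergeSortedArrs arrs).Pairwise (· ≤ ·) := by
  have hgetD : ∀ (j : Nat), j < arrs.length → (arrs.map List.tail).getD j [] = (arrs.getD j []).tail := by
    intro j hj
    rw [List.getD_eq_getElem _ _ (by simpa using hj), List.getD_eq_getElem _ _ hj, List.getElem_map]
  have hinv : MergeInv (arrs.map List.tail) (mergeSortedArrs.pvInitHeap arrs 0) := by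
    refine ⟨?_, pvInitHeap_snd_nodup arrs 0, ?_, ?_⟩
    · intro p hp y hy
      obtain ⟨j, hj, hp2, t, harr⟩ := pvInitHeap_mem hp
      rw [Nat.zero_add] at hp2
      rw [hp2, hgetD j hj, harr] at hy
      have hmem : arrs.getD j [] ∈ arrs := by
        rw [List.getD_eq_getElem _ _ hj]; exact List.getElem_mem hj
      have := h _ hmem
      rw [harr] at this
      exact (List.pairwise_cons.mp this).1 y hy
    · intro j hj
      rw [List.length_map] at hj
      cases harr : arrs.getD j [] with
      | nil => right; rw [hgetD j hj, harr]; rfl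
      | cons x t =>
        left
        refine ⟨(x, j), ?_, rfl⟩
        have := pvInitHeap_cover (k := 0) hj harr
        rwa [Nat.zero_add] at this
    · intro l hl
      obtain ⟨a, ha, rfl⟩ := List.mem_map.mp hl
      exact (h a ha).sublist (List.tail_sublist a)
  have hspec := pvMergeLoop_spec (arrs.map List.tail) (mergeSortedArrs.pvInitHeap arrs 0) hinv
  have hout : mergeSortedArrs arrs = pvMergeLoop (arrs.map List.tail) (mergeSortedArrs.pvInitHeap arrs 0) := rfl
  rw [hout]
  exact ⟨hspec.1.trans (pvInitHeap_perm arrs 0), hspec.2⟩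

-- ===== the run-splitting loop =====

-- the decreasing-run slice arr[i-1 : s-1 : -1] is the reverse of arr[s:i]
theorem pvSliceNeg (xs : List Int) (s i : Nat) (h1 : 1 ≤ s) (h2 : s ≤ i) (h3 : i ≤ xs.length) :
    (PySem.List.slice? xs (some ((i : Int) - 1)) (some ((s : Int) - 1)) (-1)).getD []
      = ((xs.drop s).take (i - s)).reverse := by
  unfold PySem.List.slice? PySem.List.sliceIndices
  norm_num
  rw [if_neg (by omega : ¬ i = 0), if_neg (by omega : ¬ s = 0)]
  rw [(by omega : min ((i:Int) - 1) ((xs.length:Int) - 1) = (i:Int) - 1),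
      (by omega : min ((s:Int) - 1) ((xs.length:Int) - 1) = (s:Int) - 1)]
  rw [(by split_ifs <;> omega :
    (if ((s:Int) - 1 < (i:Int) - 1) then (((i:Int) - 1) - ((s:Int) - 1)).toNat else 0) = i - s)]
  rw [List.filterMap_congr (g := fun k => some (xs.getD (i - 1 - k) 0)) ?_]
  · have hfm : List.filterMap (fun k => some (xs.getD (i - 1 - k) 0)) (List.range (i - s))
        = (List.range (i - s)).map (fun k => xs.getD (i - 1 - k) 0) :=
      List.filterMap_eq_map_iff_forall_eq_some.mpr (fun x _ => rfl)
    rw [hfm]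
    apply List.ext_getElem
    · simp; omega
    · intro j hj hj'
      have hjlt : j < i - s := by simpa using hj
      rw [List.getElem_map, List.getElem_reverse, List.getElem_take, List.getElem_drop,
        ← List.getD_eq_getElem xs 0, List.getElem_range]
      have hlen : (List.take (i - s) (List.drop s xs)).length = i - s := by
        simp; omega
      rw [(by omega : s + ((List.take (i - s) (List.drop s xs)).length - 1 - j) = i - 1 - j)]
  · intro k hk
    have hk' : k < i - s := by simpa using hk
    have hidx : (((i:Int) - 1) + -(k:Int)).toNat = i - 1 - k := by omega
    have hb : i - 1 - k < xs.length := by omega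
    rw [hidx]
    simp [List.getD, List.getElem?_eq_getElem hb]

def ChainInc (arr : List Int) (s k : Nat) : Prop :=
  ∀ j, s ≤ j → j + 1 ≤ k → arr.getD j 0 ≤ arr.getD (j + 1) 0

def ChainDec (arr : List Int) (s k : Nat) : Prop :=
  ∀ j, s ≤ j → j + 1 ≤ k → arr.getD (j + 1) 0 < arr.getD j 0

theorem chain_getElem {arr : List Int} {s k : Nat} {R : Int → Int → Prop}
    (h : ∀ j, s ≤ j → j + 1 ≤ k → R (arr.getD j 0) (arr.getD (j + 1) 0))
    (hk : k < arr.length) :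
    List.IsChain R ((arr.drop s).take (k + 1 - s)) := by
  rw [List.isChain_iff_getElem]
  intro j hj
  have hlen : (List.take (k + 1 - s) (List.drop s arr)).length = min (k + 1 - s) (arr.length - s) := by
    simp
  have hj1 : j + 1 < min (k + 1 - s) (arr.length - s) := by omega
  rw [List.getElem_take, List.getElem_drop, List.getElem_take, List.getElem_drop]
  have := h (s + j) (by omega) (by omega)
  rwa [List.getD_eq_getElem _ _ (by omega), List.getD_eq_getElem _ _ (by omega)] at this

theorem chainInc_pairwise {arr : List Int} {s k : Nat} (h : ChainInc arr s k)
    (hk : k < arr.length) :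
    ((arr.drop s).take (k + 1 - s)).Pairwise (· ≤ ·) :=
  (chain_getElem h hk).pairwise

theorem chainDec_pairwise {arr : List Int} {s k : Nat} (h : ChainDec arr s k)
    (hk : k < arr.length) :
    (((arr.drop s).take (k + 1 - s)).reverse).Pairwise (· ≤ ·) := by
  rw [List.pairwise_reverse]
  exact ((chain_getElem (R := fun a b => b < a) h hk).pairwise).imp (fun hab => le_of_lt hab)

theorem chainInc_vacuous {arr : List Int} {s k : Nat} (h : k ≤ s) : ChainInc arr s k := by
  unfold ChainInc; intro j hj hj1; omega

theorem chainDec_vacuous {arr : List Int} {s k : Nat} (h : k ≤ s) : ChainDec arr s k := by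
  unfold ChainDec; intro j hj hj1; omega

def FrontInv (arr : List Int) (k : Nat) (st : List (List Int) × Bool × Int) : Prop :=
  ∃ sN : Nat, st.2.2 = (sN : Int) ∧ sN ≤ k ∧ (st.2.1 = false → 1 ≤ sN) ∧
    (k = arr.length → k ≠ 0 → sN = k) ∧
    (∀ l ∈ st.1, l.Pairwise (· ≤ ·)) ∧
    st.1.flatten.Perm (arr.take sN) ∧
    (if st.2.1 then ChainInc arr sN k else ChainDec arr sN k)

theorem front_inv (arr : List Int) (k : Nat) (hk : k ≤ arr.length) :
    FrontInv arr k
      ((PySem.List.pyRange 1 ((k : Int) + 1)).foldl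
        (fun st i =>
          if i = (arr.length : Int) ∨ (PySem.List.pyGetD arr i 0 < PySem.List.pyGetD arr (i - 1) 0 ∧ st.2.1 = true)
               ∨ (PySem.List.pyGetD arr (i - 1) 0 ≤ PySem.List.pyGetD arr i 0 ∧ st.2.1 = false) then
            (st.1 ++ [if st.2.1 then PySem.List.slice arr (some st.2.2) (some i)
                      else (PySem.List.slice? arr (some (i - 1)) (some (st.2.2 - 1)) (-1)).getD []],
             !st.2.1, i)
          else st)
        ([], true, 0)) := by
  induction k with
  | zero =>
    have h0 : PySem.List.pyRange 1 (((0:Nat) : Int) + 1) = [] := by norm_num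
    rw [h0, List.foldl_nil]
    refine ⟨0, by norm_num, le_refl _, by simp, by omega, by simp, by simp, ?_⟩
    simp only [if_true]
    intro j hj hj1; omega
  | succ k ih =>
    set F := (fun (st : List (List Int) × Bool × Int) (i : Int) =>
        if i = (arr.length : Int) ∨ (PySem.List.pyGetD arr i 0 < PySem.List.pyGetD arr (i - 1) 0 ∧ st.2.1 = true)
             ∨ (PySem.List.pyGetD arr (i - 1) 0 ≤ PySem.List.pyGetD arr i 0 ∧ st.2.1 = false) then
          (st.1 ++ [if st.2.1 then PySem.List.slice arr (some st.2.2) (some i)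
                    else (PySem.List.slice? arr (some (i - 1)) (some (st.2.2 - 1)) (-1)).getD []],
           !st.2.1, i)
        else st) with hF
    have ih' := ih (by omega)
    have hcast : (((k+1:Nat)) : Int) + 1 = (((k:Nat) : Int) + 1) + 1 := by push_cast; ring
    rw [hcast, PySem.List.pyRange_one_succ_right (by omega), List.foldl_append,
      List.foldl_cons, List.foldl_nil]
    set st := List.foldl F ([], true, 0) (PySem.List.pyRange 1 (((k:Nat) : Int) + 1)) with hst
    clear_value st
    obtain ⟨sN, hs, hsk, hdec1, hend, hsubs, hperm, hchain⟩ := ih'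
    obtain ⟨subs, inc, sI⟩ := st
    simp only at hs hdec1 hsubs hperm hchain ⊢
    subst hs
    rw [hF]
    dsimp only
    have hget1 : PySem.List.pyGetD arr (((k:Nat):Int) + 1) 0 = arr.getD (k+1) 0 := by
      rw [(by push_cast; ring : ((k:Nat):Int) + 1 = (((k+1:Nat)):Int)), PySem.List.pyGetD_natCast]
    have hget0 : PySem.List.pyGetD arr (((k:Nat):Int) + 1 - 1) 0 = arr.getD k 0 := by
      rw [(by push_cast; ring : ((k:Nat):Int) + 1 - 1 = ((k:Nat):Int)), PySem.List.pyGetD_natCast]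
    have htake : arr.take sN ++ (arr.drop sN).take (k + 1 - sN) = arr.take (k + 1) := by
      rw [← List.take_add, (by omega : sN + (k + 1 - sN) = k + 1)]
    by_cases hC : ((k:Nat):Int) + 1 = (arr.length : Int)
        ∨ (PySem.List.pyGetD arr (((k:Nat):Int) + 1) 0 < PySem.List.pyGetD arr (((k:Nat):Int) + 1 - 1) 0 ∧ inc = true)
        ∨ (PySem.List.pyGetD arr (((k:Nat):Int) + 1 - 1) 0 ≤ PySem.List.pyGetD arr (((k:Nat):Int) + 1) 0 ∧ inc = false)
    · rw [if_pos hC]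
      refine ⟨k + 1, by push_cast; ring, le_refl _, fun _ => by omega, fun _ _ => rfl, ?_, ?_, ?_⟩
      · intro l hl
        rcases List.mem_append.mp hl with hl | hl
        · exact hsubs l hl
        · rw [List.mem_singleton] at hl
          subst hl
          cases inc with
          | true =>
            rw [if_pos rfl]
            rw [(by push_cast; ring : ((k:Nat):Int) + 1 = (((k+1:Nat)):Int)),
              PySem.List.slice_natCast]
            exact chainInc_pairwise (by simpa using hchain) (by omega)
          | false =>
            rw [if_neg (by simp)]
            rw [(by push_cast; ring : ((k:Nat):Int) + 1 - 1 = ((k+1:Nat):Int) - 1),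
              pvSliceNeg arr sN (k+1) (hdec1 rfl) (by omega) (by omega)]
            exact chainDec_pairwise (by simpa using hchain) (by omega)
      · rw [List.flatten_append, List.flatten_cons, List.flatten_nil, List.append_nil]
        cases inc with
        | true =>
          rw [if_pos rfl]
          rw [(by push_cast; ring : ((k:Nat):Int) + 1 = (((k+1:Nat)):Int)),
            PySem.List.slice_natCast]
          exact (hperm.append_right _).trans (by rw [htake])
        | false =>
          rw [if_neg (by simp)]
          rw [(by push_cast; ring : ((k:Nat):Int) + 1 - 1 = ((k+1:Nat):Int) - 1),
            pvSliceNeg arr sN (k+1) (hdec1 rfl) (by omega) (by omega)]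
          refine ((hperm.append_right _).trans ?_)
          refine ((List.reverse_perm _).append_left (arr.take sN)).trans (by rw [htake])
      · cases inc with
        | true => simpa using chainDec_vacuous (le_refl _)
        | false => simpa using chainInc_vacuous (le_refl _)
    · rw [if_neg hC]
      push Not at hC
      obtain ⟨hC1, hC2, hC3⟩ := hC
      have hklen : k + 1 < arr.length := by
        rcases Nat.lt_or_ge (k+1) arr.length with h | h
        · exact h
        · exfalso; apply hC1; omega
      refine ⟨sN, rfl, by omega, hdec1, by omega, hsubs, hperm, ?_⟩
      cases inc with
      | true =>
        simp only [if_true] at hchain ⊢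
        have hstep : arr.getD k 0 ≤ arr.getD (k+1) 0 := by
          have := hC2
          rw [hget1, hget0] at this
          rcases le_or_gt (arr.getD k 0) (arr.getD (k+1) 0) with h | h
          · exact h
          · exact (this h rfl).elim
        unfold ChainInc at hchain ⊢
        intro j hj hj1
        rcases Nat.lt_or_ge (j+1) (k+1) with h | h
        · exact hchain j hj (by omega)
        · have : j = k := by omega
          subst this; exact hstep
      | false =>
        simp only [Bool.false_eq_true, if_false] at hchain ⊢
        have hstep : arr.getD (k+1) 0 < arr.getD k 0 := by
          have := hC3
          rw [hget1, hget0] at this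
          rcases le_or_gt (arr.getD (k+1) 0) (arr.getD k 0) with h | h
          · rcases lt_or_eq_of_le h with h' | h'
            · exact h'
            · exact (this (le_of_eq h'.symm) rfl).elim
          · exact (this (le_of_lt h) rfl).elim
        unfold ChainDec at hchain ⊢
        intro j hj hj1
        rcases Nat.lt_or_ge (j+1) (k+1) with h | h
        · exact hchain j hj (by omega)
        · have : j = k := by omega
          subst this; exact hstep

-- ===== VERDICT (by name: the statement is the Claim_ definition above) =====
theorem sortIncreasingDecreasingArray_spec : Claim_equal_sortIncreasingDecreasingArray := by
  intro arr _
  unfold Spec_sortIncreasingDecreasingArray sortIncreasingDecreasingArray_alt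
  obtain ⟨sN, hs, hsk, hdec1, hend, hsubs, hperm, hchain⟩ := front_inv arr arr.length (le_refl _)
  have hsN : sN = arr.length := by
    by_cases h0 : arr.length = 0
    · omega
    · exact hend rfl h0
  subst hsN
  rw [List.take_length] at hperm
  have hm := mergeSortedArrs_spec _ hsubs
  have hA : sortIncreasingDecreasingArray arr
      = mergeSortedArrs ((PySem.List.pyRange 1 ((arr.length : Int) + 1)).foldl
        (fun st i =>
          if i = (arr.length : Int) ∨ (PySem.List.pyGetD arr i 0 < PySem.List.pyGetD arr (i - 1) 0 ∧ st.2.1 = true)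
               ∨ (PySem.List.pyGetD arr (i - 1) 0 ≤ PySem.List.pyGetD arr i 0 ∧ st.2.1 = false) then
            (st.1 ++ [if st.2.1 then PySem.List.slice arr (some st.2.2) (some i)
                      else (PySem.List.slice? arr (some (i - 1)) (some (st.2.2 - 1)) (-1)).getD []],
             !st.2.1, i)
          else st)
        ([], true, 0)).1 := rfl
  rw [hA]
  refine PySem.List.eq_of_perm_of_pairwise_le_of_injective (fun x => x) (fun a b h => h) ?_ ?_ ?_
  · exact (hm.1.trans hperm).trans (PySem.List.sorted_perm arr (fun x => x) false).symm
  · exact hm.2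
  · exact PySem.List.sorted_pairwise arr (fun x => x)
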